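-- pv_equiv track=rewrite | github.com/Tarunadityaselva/crypto-lib | address/eth_utils_address.py | from_base36
-- ===== SOURCE A (Python) =====
-- def from_base36(value):
--     value = value.lower()
--     result = 0
--     for char in value:
--         result *= 36
--         if char.isdigit():
--             result += int(char)
--         else:
--             result += ord(char) - 87
--     return result
-- ===== SOURCE B (Python) =====
-- def from_base36(value):
--     value = value.lower()
--     total = 0
--     power = 1
--     for char in reversed(value):
--         if char.isdigit():
--             d = int(char)
--         else:
--             d = ord(char) - 87
--         total += d * power
--         power *= 36
--     return total
-- ===== Notes on version B (the rewrite author's own statement) =====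
-- stated objective: alternative
-- what changed: Replaces Horner's rule (multiply accumulator by 36 each step, left-to-right) with an explicit positional weighted sum: iterate the lowered string in reverse keeping a place-value power (36**i) and add digit*power.
import Mathlib
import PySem

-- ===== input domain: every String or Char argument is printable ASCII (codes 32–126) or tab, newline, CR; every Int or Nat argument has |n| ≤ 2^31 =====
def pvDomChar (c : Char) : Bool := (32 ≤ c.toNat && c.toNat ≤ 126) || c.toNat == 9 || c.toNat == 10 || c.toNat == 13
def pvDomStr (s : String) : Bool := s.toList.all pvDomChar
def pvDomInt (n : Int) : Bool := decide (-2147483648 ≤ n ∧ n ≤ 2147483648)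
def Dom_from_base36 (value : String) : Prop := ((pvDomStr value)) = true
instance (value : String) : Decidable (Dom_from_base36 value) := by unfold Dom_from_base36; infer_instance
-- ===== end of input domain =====

-- B replaces Horner's accumulator with an explicit reverse-order weighted sum; same values, alternative decomposition.
-- ===== PORT A =====
-- shared digit mapping of both Pythons: 'int(char) if char.isdigit() else ord(char) - 87';
-- on the ASCII domain int(char) under isdigit equals ord(char) - 48, which is exact here.
def pyDigit (c : Char) : Int :=
  if PySem.Chars.isdigit c then (c.toNat : Int) - 48 else (c.toNat : Int) - 87

def from_base36 (value : String) : Int :=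
  (PySem.Chars.lower value.toList).foldl (fun result char => result * 36 + pyDigit char) 0

-- ===== PORT B =====
def from_base36_alt (value : String) : Int :=
  ((PySem.Chars.lower value.toList).reverse.foldl
    (fun (st : Int × Int) char => (st.1 + pyDigit char * st.2, st.2 * 36)) (0, 1)).1

-- ===== PRECONDITION & SPEC =====
def Spec_from_base36 (value : String) (out : Int) : Prop := out = from_base36_alt value
instance (value : String) (out : Int) : Decidable (Spec_from_base36 value out) := by unfold Spec_from_base36; infer_instance

-- ===== CLAIM (what is proved, stated in full; the proofs are below) =====
def Claim_equal_from_base36 : Prop := ∀ (value : String), Dom_from_base36 value → Spec_from_base36 value (from_base36 value)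

-- ===== LEMMAS AND PROOFS =====
-- B's fold with state (total, power) is affine in its starting state.
theorem wfold_affine (l : List Char) (s p : Int) :
    (l.foldl (fun (st : Int × Int) char => (st.1 + pyDigit char * st.2, st.2 * 36)) (s, p)).1
      = s + p * (l.foldl (fun (st : Int × Int) char => (st.1 + pyDigit char * st.2, st.2 * 36)) (0, 1)).1 := by
  induction l generalizing s p with
  | nil => simp
  | cons c t ih =>
    simp only [List.foldl_cons]
    rw [ih (s + pyDigit c * p) (p * 36), ih (0 + pyDigit c * 1) (1 * 36)]
    ring

-- Horner over l equals B's weighted sum over l.reverse.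
theorem horner_eq_wsum (l : List Char) :
    l.foldl (fun result char => result * 36 + pyDigit char) 0
      = (l.reverse.foldl (fun (st : Int × Int) char => (st.1 + pyDigit char * st.2, st.2 * 36)) (0, 1)).1 := by
  induction l using List.reverseRecOn with
  | nil => simp
  | append_singleton t c ih =>
    rw [List.foldl_append, List.reverse_append]
    simp only [List.reverse_singleton, List.singleton_append, List.foldl_cons, List.foldl_nil]
    rw [wfold_affine, ← ih]
    ring

-- ===== VERDICT (by name: the statement is the Claim_ definition above) =====
theorem from_base36_spec : Claim_equal_from_base36 := by
  intro value _
  unfold Spec_from_base36 from_base36 from_base36_alt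
  exact horner_eq_wsum _
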